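-- pv_equiv track=rewrite | github.com/TetianaHrunyk/DailyCodingProblems | challenge114.py | reverse_word_order
-- ===== SOURCE A (Python) =====
-- def reverse_word_order(s: str):
--     delimeters = []
--     words = []
--     word = ""
--     for char in s:
--         if not char.isalnum():
--             if word != "":
--                 words.append(word)
--                 delimeters.append("word")
--                 word = ""
--             delimeters.append(char)
--         else:
--             word += char
--
--     if word != "":
--         delimeters.append("word")
--         words.append(word)
--     words = words[::-1]
--
--     rvs = ""
--     words_count = 0
--     for delimiter in delimeters:
--         if delimiter == "word":
--             rvs += words[words_count]
--             words_count += 1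
--         else:
--             rvs += delimiter
--
--     return rvs
-- ===== SOURCE B (Python) =====
-- def reverse_word_order(s: str):
--     # Pass 1: collect the alnum words only.
--     words = []
--     word = []
--     for ch in s:
--         if ch.isalnum():
--             word.append(ch)
--         elif word:
--             words.append(''.join(word))
--             word = []
--     if word:
--         words.append(''.join(word))
--     words.reverse()
--     # Pass 2: re-scan the original string with an in_word flag; emit the next
--     # reversed word at the start of each alnum run, delimiters verbatim.
--     out = []
--     i = 0
--     in_word = False
--     for ch in s:
--         if ch.isalnum():
--             if not in_word:
--                 out.append(words[i])
--                 i += 1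
--                 in_word = True
--         else:
--             in_word = False
--             out.append(ch)
--     return ''.join(out)
-- ===== Notes on version B (the rewrite author's own statement) =====
-- stated objective: simpler
-- what changed: B drops A's interleaved sentinel-marked delimiter template entirely: it collects only the words, reverses them, and rebuilds by re-scanning the original string with an in_word flag, emitting each reversed word at the start of an alnum run and delimiter characters verbatim.
import Mathlib
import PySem

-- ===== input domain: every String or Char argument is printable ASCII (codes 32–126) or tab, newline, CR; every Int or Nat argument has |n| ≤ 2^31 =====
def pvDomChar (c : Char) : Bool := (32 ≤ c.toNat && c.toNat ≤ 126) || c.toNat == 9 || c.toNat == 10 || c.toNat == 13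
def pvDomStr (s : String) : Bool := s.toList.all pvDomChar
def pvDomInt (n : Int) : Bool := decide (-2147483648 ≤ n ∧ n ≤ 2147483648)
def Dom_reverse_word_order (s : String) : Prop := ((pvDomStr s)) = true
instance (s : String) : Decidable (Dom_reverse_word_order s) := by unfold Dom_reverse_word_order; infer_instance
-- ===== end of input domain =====

-- B replaces A's interleaved sentinel-marked delimiter template by a second scan of
-- the original string with an in_word flag (objective: simpler decomposition).

-- ===== PORT A =====
-- first loop of A: state (delimeters, words, word); none plays the "word" sentinel
def pvLoopA : List Char → List (Option Char) → List (List Char) → List Char →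
    (List (Option Char) × List (List Char) × List Char)
  | [], d, ws, w => (d, ws, w)
  | c :: rest, d, ws, w =>
    if ¬ PySem.Chars.isalnum c then
      if w ≠ [] then pvLoopA rest (d ++ [none, some c]) (ws ++ [w]) []
      else pvLoopA rest (d ++ [some c]) ws w
    else pvLoopA rest d ws (w ++ [c])

-- second loop of A: rvs += words[words_count] — the index is always in range
-- (one sentinel per collected word), so List.getD is exact here
def pvEmitA : List (Option Char) → List (List Char) → Nat → List Char → List Char
  | [], _, _, rvs => rvs
  | none :: rest, ws, cnt, rvs => pvEmitA rest ws (cnt + 1) (rvs ++ List.getD ws cnt [])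
  | some c :: rest, ws, cnt, rvs => pvEmitA rest ws cnt (rvs ++ [c])

def reverse_word_order (s : String) : String :=
  let (d, ws, w) := pvLoopA s.toList [] [] []
  let d := if w ≠ [] then d ++ [none] else d
  let ws := if w ≠ [] then ws ++ [w] else ws
  String.ofList (pvEmitA d ws.reverse 0 [])

-- ===== PORT B =====
-- pass 1 of B: collect the words only
def pvLoopB1 : List Char → List (List Char) → List Char → (List (List Char) × List Char)
  | [], ws, w => (ws, w)
  | c :: rest, ws, w =>
    if PySem.Chars.isalnum c then pvLoopB1 rest ws (w ++ [c])
    else if w ≠ [] then pvLoopB1 rest (ws ++ [w]) []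
    else pvLoopB1 rest ws w

-- pass 2 of B: re-scan s with an in_word flag; words[i] is always in range
def pvLoopB2 : List Char → List (List Char) → Nat → Bool → List Char → List Char
  | [], _, _, _, out => out
  | c :: rest, ws, i, inw, out =>
    if PySem.Chars.isalnum c then
      if ¬ inw then pvLoopB2 rest ws (i + 1) true (out ++ List.getD ws i [])
      else pvLoopB2 rest ws i true out
    else pvLoopB2 rest ws i false (out ++ [c])

def reverse_word_order_alt (s : String) : String :=
  let (ws, w) := pvLoopB1 s.toList [] []
  let ws := if w ≠ [] then ws ++ [w] else ws
  String.ofList (pvLoopB2 s.toList ws.reverse 0 false [])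

-- ===== PRECONDITION & SPEC =====
def Spec_reverse_word_order (s : String) (out : String) : Prop := out = reverse_word_order_alt s
instance (s : String) (out : String) : Decidable (Spec_reverse_word_order s out) := by unfold Spec_reverse_word_order; infer_instance

-- ===== CLAIM (what is proved, stated in full; the proofs are below) =====
def Claim_equal_reverse_word_order : Prop := ∀ (s : String), Dom_reverse_word_order s → Spec_reverse_word_order s (reverse_word_order s)

-- ===== LEMMAS AND PROOFS =====

-- the delimiter template A builds from a suffix, given whether a word is pending
def pvDelimsR : List Char → Bool → List (Option Char)
  | [], inw => if inw then [none] else []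
  | c :: rest, inw =>
    if PySem.Chars.isalnum c then pvDelimsR rest true
    else (if inw then [none] else []) ++ some c :: pvDelimsR rest false

-- the flushed word list extracted from a suffix, given the pending word
def pvWordsR : List Char → List Char → List (List Char)
  | [], w => if w ≠ [] then [w] else []
  | c :: rest, w =>
    if PySem.Chars.isalnum c then pvWordsR rest (w ++ [c])
    else (if w ≠ [] then [w] else []) ++ pvWordsR rest []

theorem pvLoopA_delims (l : List Char) : ∀ (d : List (Option Char)) (ws : List (List Char)) (w : List Char),
    (pvLoopA l d ws w).1 ++ (if (pvLoopA l d ws w).2.2 ≠ [] then [none] else []) = d ++ pvDelimsR l (decide (w ≠ [])) := by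
  induction l with
  | nil => intro d ws w; by_cases hw : w = [] <;> simp [pvLoopA, pvDelimsR, hw]
  | cons c rest ih =>
    intro d ws w
    by_cases h : PySem.Chars.isalnum c
    · simpa [pvLoopA, pvDelimsR, h] using ih d ws (w ++ [c])
    · by_cases hw : w = []
      · simpa [pvLoopA, pvDelimsR, h, hw] using ih (d ++ [some c]) ws []
      · simpa [pvLoopA, pvDelimsR, h, hw] using ih (d ++ [none, some c]) (ws ++ [w]) []

theorem pvLoopA_words (l : List Char) : ∀ (d : List (Option Char)) (ws : List (List Char)) (w : List Char),
    (pvLoopA l d ws w).2.1 ++ (if (pvLoopA l d ws w).2.2 ≠ [] then [(pvLoopA l d ws w).2.2] else []) = ws ++ pvWordsR l w := by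
  induction l with
  | nil => intro d ws w; by_cases hw : w = [] <;> simp [pvLoopA, pvWordsR, hw]
  | cons c rest ih =>
    intro d ws w
    by_cases h : PySem.Chars.isalnum c
    · simpa [pvLoopA, pvWordsR, h] using ih d ws (w ++ [c])
    · by_cases hw : w = []
      · simpa [pvLoopA, pvWordsR, h, hw] using ih (d ++ [some c]) ws []
      · simpa [pvLoopA, pvWordsR, h, hw] using ih (d ++ [none, some c]) (ws ++ [w]) []

theorem pvLoopB1_words (l : List Char) : ∀ (ws : List (List Char)) (w : List Char),
    (pvLoopB1 l ws w).1 ++ (if (pvLoopB1 l ws w).2 ≠ [] then [(pvLoopB1 l ws w).2] else []) = ws ++ pvWordsR l w := by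
  induction l with
  | nil => intro ws w; by_cases hw : w = [] <;> simp [pvLoopB1, pvWordsR, hw]
  | cons c rest ih =>
    intro ws w
    by_cases h : PySem.Chars.isalnum c
    · simpa [pvLoopB1, pvWordsR, h] using ih ws (w ++ [c])
    · by_cases hw : w = []
      · simpa [pvLoopB1, pvWordsR, h, hw] using ih ws []
      · simpa [pvLoopB1, pvWordsR, h, hw] using ih (ws ++ [w]) []

-- core correspondence: A's sentinel-template replay equals B's flagged re-scan
theorem pvEmit_eq_scan (l : List Char) : ∀ (ws : List (List Char)) (cnt : Nat) (rvs : List Char),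
    pvEmitA (pvDelimsR l false) ws cnt rvs = pvLoopB2 l ws cnt false rvs ∧
    pvEmitA (pvDelimsR l true) ws cnt rvs = pvLoopB2 l ws (cnt + 1) true (rvs ++ List.getD ws cnt []) := by
  induction l with
  | nil => intro ws cnt rvs; simp [pvDelimsR, pvEmitA, pvLoopB2]
  | cons c rest ih =>
    intro ws cnt rvs
    by_cases h : PySem.Chars.isalnum c
    · constructor
      · simpa [pvDelimsR, pvLoopB2, h] using (ih ws cnt rvs).2
      · simpa [pvDelimsR, pvLoopB2, h] using (ih ws cnt rvs).2
    · constructor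
      · simpa [pvDelimsR, pvEmitA, pvLoopB2, h] using (ih ws cnt (rvs ++ [c])).1
      · simpa [pvDelimsR, pvEmitA, pvLoopB2, h] using
          (ih ws (cnt + 1) (rvs ++ List.getD ws cnt [] ++ [c])).1

-- ===== VERDICT (by name: the statement is the Claim_ definition above) =====
theorem reverse_word_order_spec : Claim_equal_reverse_word_order := by
  intro s _
  unfold Spec_reverse_word_order reverse_word_order reverse_word_order_alt
  rcases hA : pvLoopA s.toList [] [] [] with ⟨d, ws, w⟩
  rcases hB : pvLoopB1 s.toList [] [] with ⟨ws2, w2⟩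
  have hd := pvLoopA_delims s.toList [] [] []
  have hwA := pvLoopA_words s.toList [] [] []
  have hwB := pvLoopB1_words s.toList [] []
  rw [hA] at hd hwA
  rw [hB] at hwB
  have hd' : (d ++ if w ≠ [] then [none] else []) = pvDelimsR s.toList false := by
    simpa using hd
  have hwA' : (ws ++ if w ≠ [] then [w] else []) = pvWordsR s.toList [] := by
    simpa using hwA
  have hwB' : (ws2 ++ if w2 ≠ [] then [w2] else []) = pvWordsR s.toList [] := by
    simpa using hwB
  have e1 : (if w ≠ [] then d ++ [none] else d) = pvDelimsR s.toList false := by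
    rw [← hd']; by_cases hw : w = [] <;> simp [hw]
  have e2 : (if w ≠ [] then ws ++ [w] else ws) = pvWordsR s.toList [] := by
    rw [← hwA']; by_cases hw : w = [] <;> simp [hw]
  have e3 : (if w2 ≠ [] then ws2 ++ [w2] else ws2) = pvWordsR s.toList [] := by
    rw [← hwB']; by_cases hw : w2 = [] <;> simp [hw]
  simp only [e1, e2, e3]
  rw [(pvEmit_eq_scan s.toList ((pvWordsR s.toList []).reverse) 0 []).1]
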